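-- pv_equiv track=rewrite | github.com/RabbitSeries/AdventofCode | Python/2022/main/year2022/Day13/PacketsCompare.py | ConsumeList
-- ===== SOURCE A (Python) =====
-- def ConsumeList(s: str):
--     stack = []
--     res: str | None = None
--     for i, c in enumerate(s, 0):
--         if c == "[":
--             stack.append(i)
--         elif c == "]":
--             if len(stack) > 1:
--                 stack.pop()
--             elif len(stack) == 1:
--                 res = s[stack[0]:i + 1]  # "[*]"
--                 s = s[i + 1:]
--                 if s and s[0] == ",":  # Commit char
--                     s = s[1:]
--                 break
--     return (res, s)
-- ===== SOURCE B (Python) =====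
-- def ConsumeList(s: str):
--     # Staged string searches instead of a per-character state machine:
--     # locate the first '[', then try each subsequent ']' as the closer,
--     # accepting the first one where the enclosed segment's bracket counts balance.
--     start = s.find("[")
--     if start == -1:
--         return (None, s)
--     j = start
--     while True:
--         j = s.find("]", j + 1)
--         if j == -1:
--             return (None, s)
--         if s.count("[", start, j + 1) == s.count("]", start, j + 1):
--             break
--     res = s[start:j + 1]
--     rest = s[j + 1:]
--     if rest[:1] == ",":
--         rest = rest[1:]
--     return (res, rest)
-- ===== Notes on version B (the rewrite author's own statement) =====
-- stated objective: alternative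
-- what changed: Replaces the per-character stack state machine with staged string searches: find the first '[', then repeatedly find the next ']' and accept the first one where the bracket counts of the enclosed segment balance; the bulk scanning moves into str.find/str.count, which is the constant-factor speed mechanism.
import Mathlib
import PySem

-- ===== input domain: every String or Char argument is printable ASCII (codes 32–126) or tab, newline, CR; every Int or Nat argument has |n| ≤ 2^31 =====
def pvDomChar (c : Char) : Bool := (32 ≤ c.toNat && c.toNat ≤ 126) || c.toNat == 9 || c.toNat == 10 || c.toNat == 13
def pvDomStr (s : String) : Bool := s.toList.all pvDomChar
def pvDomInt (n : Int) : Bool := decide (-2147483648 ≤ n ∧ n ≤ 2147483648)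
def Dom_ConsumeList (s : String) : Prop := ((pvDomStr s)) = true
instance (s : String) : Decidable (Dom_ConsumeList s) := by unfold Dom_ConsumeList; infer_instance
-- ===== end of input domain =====

-- B replaces A's per-character stack state machine by staged string searches
-- (find the first '[', then test each later ']' by bracket-count balance); alternative, not faster.

-- ===== PORT A =====
-- Loop of A: `stack` is a list of indices (append at the end, pop() removes the last,
-- stack[0] is the head). Slices s[a:b] with 0 ≤ a ≤ b are exactly (s.drop a).take (b-a);
-- `if s and s[0] == ","` is the head?-test.
def pvGoA (s : List Char) (i : Nat) (rest : List Char) (stack : List Nat) :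
    Option (List Char) × List Char :=
  match rest with
  | [] => (none, s)
  | c :: cs =>
    if c = '[' then
      pvGoA s (i + 1) cs (stack ++ [i])
    else if c = ']' then
      if stack.length > 1 then
        pvGoA s (i + 1) cs stack.dropLast
      else if stack.length = 1 then
        let res := (s.drop (stack.headD 0)).take (i + 1 - stack.headD 0)
        let s1 := s.drop (i + 1)
        let s2 := if s1.head? = some ',' then s1.tail else s1
        (some res, s2)
      else
        pvGoA s (i + 1) cs stack
    else
      pvGoA s (i + 1) cs stack

def ConsumeList (s : String) : Option String × String :=
  let r := pvGoA s.toList 0 s.toList []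
  (r.1.map String.ofList, String.ofList r.2)

-- ===== PORT B =====
-- s.find(c, k) with 0 ≤ k: index of the first occurrence of c at position ≥ k
-- (none = Python's -1); hand port of the library call, exact on this use.
def pvFindB (cs : List Char) (c : Char) (k : Nat) : Option Nat :=
  if h : k < cs.length then
    if cs[k] = c then some k else pvFindB cs c (k + 1)
  else none
termination_by cs.length - k

-- s.count(c, a, b) with 0 ≤ a ≤ b: occurrences of c in s[a:b]; exact on this use.
def pvCountB (cs : List Char) (c : Char) (a b : Nat) : Nat :=
  ((cs.drop a).take (b - a)).count c

-- the `while True:` loop of Source B; j strictly increases each turn, so cs.length is enough fuel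
def pvLoopB (cs : List Char) (start j fuel : Nat) : Option Nat :=
  match fuel with
  | 0 => none
  | fuel + 1 =>
    match pvFindB cs ']' (j + 1) with
    | none => none
    | some j' =>
      if pvCountB cs '[' start (j' + 1) = pvCountB cs ']' start (j' + 1) then some j'
      else pvLoopB cs start j' fuel

def ConsumeList_alt (s : String) : Option String × String :=
  let cs := s.toList
  match pvFindB cs '[' 0 with
  | none => (none, s)
  | some start =>
    match pvLoopB cs start start cs.length with
    | none => (none, s)
    | some j =>
      let res := (cs.drop start).take (j + 1 - start)
      let rest := cs.drop (j + 1)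
      let rest2 := if rest.head? = some ',' then rest.tail else rest
      (some (String.ofList res), String.ofList rest2)

-- ===== PRECONDITION & SPEC =====
def Spec_ConsumeList (s : String) (out : Option String × String) : Prop := out = ConsumeList_alt s
instance (s : String) (out : Option String × String) : Decidable (Spec_ConsumeList s out) := by
  unfold Spec_ConsumeList; infer_instance

-- ===== CLAIM =====
def Claim_equal_ConsumeList : Prop := ∀ (s : String), Dom_ConsumeList s → Spec_ConsumeList s (ConsumeList s)

-- ===== LEMMAS AND PROOFS =====

-- the first position k' ≥ k that is a ']' closing a bracket-balanced segment s[start:k'+1]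
def pvFM (cs : List Char) (start k : Nat) : Option Nat :=
  if h : k < cs.length then
    if cs[k] = ']' ∧ pvCountB cs '[' start (k + 1) = pvCountB cs ']' start (k + 1)
    then some k else pvFM cs start (k + 1)
  else none
termination_by cs.length - k

-- the pair both programs return when the group s[start:j+1] is the match
def pvOutA (cs : List Char) (start j : Nat) : Option (List Char) × List Char :=
  (some ((cs.drop start).take (j + 1 - start)),
   let s1 := cs.drop (j + 1)
   if s1.head? = some ',' then s1.tail else s1)

theorem pvFindB_ge (cs : List Char) (c : Char) (k j' : Nat)
    (h : pvFindB cs c k = some j') : k ≤ j' := by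
  fun_induction pvFindB cs c k with
  | case1 k hk hc =>
    simp only [Option.some.injEq] at h
    omega
  | case2 k hk hc ih => have := ih h; omega
  | case3 k hk => exact absurd h (by simp)

theorem pvCount_step (cs : List Char) (c : Char) (start i : Nat)
    (h1 : start ≤ i) (h2 : i < cs.length) :
    pvCountB cs c start (i + 1) = pvCountB cs c start i + (if cs[i] = c then 1 else 0) := by
  unfold pvCountB
  have h3 : i + 1 - start = (i - start) + 1 := by omega
  have h4 : i - start < (cs.drop start).length := by simp; omega
  rw [h3, List.take_add_one, List.getElem?_eq_getElem h4, List.count_append]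
  have h5 : (cs.drop start)[i - start] = cs[i] := by
    rw [List.getElem_drop]
    congr 1; omega
  simp [h5, List.count_singleton]

-- skipping non-']' characters: pvFM jumps straight to the next ']' found by pvFindB
theorem pvSkip (cs : List Char) (start k : Nat) :
    pvFM cs start k =
      (match pvFindB cs ']' k with
       | none => none
       | some j' =>
         if pvCountB cs '[' start (j' + 1) = pvCountB cs ']' start (j' + 1)
         then some j' else pvFM cs start (j' + 1)) := by
  rw [pvFM, pvFindB]
  by_cases h : k < cs.length
  · rw [dif_pos h, dif_pos h]
    by_cases hc : cs[k] = ']'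
    · simp only [if_pos hc]
      by_cases hb : pvCountB cs '[' start (k + 1) = pvCountB cs ']' start (k + 1)
      · simp [hc, hb]
      · simp [hc, hb]
    · simp only [if_neg hc, if_neg (fun hh : cs[k] = ']' ∧ _ => hc hh.1)]
      exact pvSkip cs start (k + 1)
  · rw [dif_neg h, dif_neg h]
termination_by cs.length - k

-- Source B's search loop computes pvFM from j+1, given enough fuel
theorem pvBLoop (cs : List Char) (start : Nat) (fuel : Nat) :
    ∀ (j : Nat), cs.length ≤ fuel + j + 1 →
      pvLoopB cs start j fuel = pvFM cs start (j + 1) := by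
  induction fuel with
  | zero =>
    intro j h
    rw [pvFM, dif_neg (by omega)]
    rfl
  | succ fuel ih =>
    intro j h
    rw [pvSkip cs start (j + 1)]
    show (match pvFindB cs ']' (j + 1) with
      | none => none
      | some j' =>
        if pvCountB cs '[' start (j' + 1) = pvCountB cs ']' start (j' + 1) then some j'
        else pvLoopB cs start j' fuel) = _
    cases heq : pvFindB cs ']' (j + 1) with
    | none => rfl
    | some j' =>
      have hge := pvFindB_ge cs ']' (j + 1) j' heq
      simp only []
      split
      · rfl
      · exact ih j' (by omega)

-- Phase 2 of A's loop: once the first '[' (at index `start`) is on the stack, the stack head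
-- stays `start` and the stack length is the bracket-count difference of s[start:i]; A then
-- returns the output at the first balanced ']' (= pvFM), or (none, s) if none closes.
theorem pvA2 (cs : List Char) (start : Nat) :
    ∀ (rest : List Char) (i : Nat) (stack : List Nat),
      rest = cs.drop i → start ≤ i → stack ≠ [] → stack.headD 0 = start →
      pvCountB cs '[' start i = stack.length + pvCountB cs ']' start i →
      pvGoA cs i rest stack =
        (match pvFM cs start i with
         | none => (none, cs)
         | some j => pvOutA cs start j) := by
  intro rest
  induction rest with
  | nil =>
    intro i stack hdrop _ _ _ _
    have hlen : cs.length ≤ i := by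
      by_contra hlt
      have : cs.drop i ≠ [] := by simp [List.drop_eq_nil_iff]; omega
      exact this hdrop.symm
    rw [pvFM, dif_neg (by omega)]
    simp [pvGoA]
  | cons c cs' ih =>
    intro i stack hdrop hsi hne hhd hcnt
    have hi : i < cs.length := by
      by_contra hlt
      rw [List.drop_eq_nil_iff.mpr (by omega)] at hdrop
      exact List.cons_ne_nil c cs' hdrop
    have hci : cs[i] = c := by
      have := List.drop_eq_getElem_cons hi (l := cs)
      rw [← hdrop] at this
      exact (List.cons.injEq _ _ _ _ ▸ this).1.symm
    have hcs' : cs' = cs.drop (i + 1) := by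
      have := List.drop_eq_getElem_cons hi (l := cs)
      rw [← hdrop] at this
      exact (List.cons.injEq _ _ _ _ ▸ this).2
    have hstepO := pvCount_step cs '[' start i hsi hi
    have hstepC := pvCount_step cs ']' start i hsi hi
    rw [pvFM, dif_pos hi]
    by_cases hb : c = '['
    · rw [pvGoA, if_pos hb]
      rw [if_neg (by rw [hci, hb]; simp)]
      rw [ih (i + 1) (stack ++ [i]) hcs' (by omega) (by simp) (by
            cases stack with
            | nil => exact absurd rfl hne
            | cons a t => simpa using hhd)
          (by
            rw [hstepO, hstepC, hci, hb]
            simp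
            omega)]
    · by_cases hc : c = ']'
      · cases stack with
        | nil => exact absurd rfl hne
        | cons a t =>
          cases t with
          | nil =>
            -- stack length 1: A returns here; this is a balanced ']' so pvFM also stops here
            simp only [List.headD_cons] at hhd
            rw [pvGoA, if_neg hb, if_pos hc,
              if_neg (show ¬ ([a] : List Nat).length > 1 by simp),
              if_pos (show ([a] : List Nat).length = 1 by simp)]
            simp only [List.length_cons, List.length_nil] at hcnt
            rw [if_pos (by
              constructor
              · rw [hci]; exact hc
              · rw [hstepO, hstepC, hci]
                simp [hc, show ¬ ']' = '[' by decide]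
                omega)]
            simp [pvOutA, hhd]
          | cons b t' =>
            -- stack length ≥ 2: pop; the segment is not balanced here
            simp only [List.headD_cons] at hhd
            simp only [List.length_cons] at hcnt
            rw [pvGoA, if_neg hb, if_pos hc,
              if_pos (show (a :: b :: t').length > 1 by simp)]
            rw [if_neg (by
              intro hh
              rw [hstepO, hstepC, hci] at hh
              simp [hc, show ¬ ']' = '[' by decide] at hh
              omega)]
            rw [ih (i + 1) (a :: b :: t').dropLast hcs' (by omega)
                (by simp) (by simp [List.dropLast, hhd])
                (by
                  rw [hstepO, hstepC, hci]
                  simp [hc, show ¬ ']' = '[' by decide]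
                  omega)]
      · rw [pvGoA, if_neg hb, if_neg hc]
        rw [if_neg (by rw [hci]; exact fun hh => hc hh.1)]
        rw [ih (i + 1) stack hcs' (by omega) hne hhd (by
          rw [hstepO, hstepC, hci]
          simp [hb, hc]
          omega)]

-- Phase 1 of A's loop: empty stack; A scans to the first '[' (= pvFindB) and then behaves
-- as pvA2 from the character after it.
theorem pvA1 (cs : List Char) :
    ∀ (rest : List Char) (i : Nat), rest = cs.drop i →
      pvGoA cs i rest [] =
        (match pvFindB cs '[' i with
         | none => (none, cs)
         | some st =>
           match pvFM cs st (st + 1) with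
           | none => (none, cs)
           | some j => pvOutA cs st j) := by
  intro rest
  induction rest with
  | nil =>
    intro i hdrop
    have hlen : cs.length ≤ i := by
      by_contra hlt
      have : cs.drop i ≠ [] := by simp [List.drop_eq_nil_iff]; omega
      exact this hdrop.symm
    rw [pvFindB, dif_neg (by omega)]
    simp [pvGoA]
  | cons c cs' ih =>
    intro i hdrop
    have hi : i < cs.length := by
      by_contra hlt
      rw [List.drop_eq_nil_iff.mpr (by omega)] at hdrop
      exact List.cons_ne_nil c cs' hdrop
    have hci : cs[i] = c := by
      have := List.drop_eq_getElem_cons hi (l := cs)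
      rw [← hdrop] at this
      exact (List.cons.injEq _ _ _ _ ▸ this).1.symm
    have hcs' : cs' = cs.drop (i + 1) := by
      have := List.drop_eq_getElem_cons hi (l := cs)
      rw [← hdrop] at this
      exact (List.cons.injEq _ _ _ _ ▸ this).2
    rw [pvFindB, dif_pos hi]
    by_cases hb : c = '['
    · rw [pvGoA, if_pos hb, if_pos (by rw [hci]; exact hb)]
      exact pvA2 cs i cs' (i + 1) [i] hcs' (by omega) (by simp) (by simp)
        (by
          rw [pvCount_step cs '[' i i le_rfl hi, pvCount_step cs ']' i i le_rfl hi, hci]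
          simp [pvCountB, hb, show ¬ '[' = ']' by decide])
    · rw [if_neg (by rw [hci]; exact hb)]
      by_cases hc : c = ']'
      · rw [pvGoA, if_neg hb, if_pos hc,
          if_neg (show ¬ ([] : List Nat).length > 1 by simp),
          if_neg (show ¬ ([] : List Nat).length = 1 by simp)]
        exact ih (i + 1) hcs'
      · rw [pvGoA, if_neg hb, if_neg hc]
        exact ih (i + 1) hcs'

-- ===== VERDICT =====
theorem ConsumeList_spec : Claim_equal_ConsumeList := by
  intro s _
  unfold Spec_ConsumeList ConsumeList ConsumeList_alt
  simp only [pvA1 s.toList s.toList 0 (by simp)]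
  cases hf : pvFindB s.toList '[' 0 with
  | none => simp
  | some st =>
    simp only [pvBLoop s.toList st s.toList.length st (by omega)]
    cases hm : pvFM s.toList st (st + 1) with
    | none => simp
    | some j => simp [pvOutA]
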